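-- pv_equiv track=rewrite | github.com/LouieShao/BWR | core/BWR_Compress.py | BWR_Encode
-- ===== SOURCE A (Python) =====
-- import math
--
-- def BWR_Encode(imgdif,totalbytes):
--     tempoutputbyte=0 # Store the byte generated now 0..255
--     tempoutputbit=7 # The bit number of tempoutputbyte handled now
--     currentbyte=0 # Store the byte handled now 0..(totalbytes-1)
--     currentbit=8 # The bit number handled now 0..8
--     outputarr=[] # The array for output
--     while currentbit>=0:
--         while currentbyte<=totalbytes-1:
--             tempoutputbyte|=((imgdif[currentbyte]&int(math.pow(2,currentbit)))>>currentbit)<<tempoutputbit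
--             tempoutputbit-=1
--             if tempoutputbit<0:
--                 outputarr.append(tempoutputbyte)
--                 tempoutputbyte=0
--                 tempoutputbit=7
--             currentbyte+=1
--         currentbit-=1
--         currentbyte=0
--     if tempoutputbit!=7: # Flush the tempoutputbyte if it had data left
--         outputarr.append(tempoutputbyte)
--     return outputarr
-- ===== SOURCE B (Python) =====
-- def BWR_Encode(imgdif, totalbytes):
--     # Pass 1: transpose into the flat bit-plane sequence (bit 8 down to 0, bytes in order).
--     bits = [(imgdif[i] >> bit) & 1 for bit in range(8, -1, -1) for i in range(totalbytes)]
--     # Pass 2: pack MSB-first in chunks of 8; a final short chunk is zero-padded implicitly.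
--     out = []
--     while bits:
--         chunk, bits = bits[:8], bits[8:]
--         out.append(sum(b << (7 - j) for j, b in enumerate(chunk)))
--     return out
-- ===== Notes on version B (the rewrite author's own statement) =====
-- stated objective: simpler
-- what changed: A fuses transposition and packing in one nested loop with a carry byte/bit-counter automaton and a final flush; B first builds the flat bit-plane sequence in one comprehension and then packs it in independent chunks of 8, with no carried packing state.
import Mathlib
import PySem

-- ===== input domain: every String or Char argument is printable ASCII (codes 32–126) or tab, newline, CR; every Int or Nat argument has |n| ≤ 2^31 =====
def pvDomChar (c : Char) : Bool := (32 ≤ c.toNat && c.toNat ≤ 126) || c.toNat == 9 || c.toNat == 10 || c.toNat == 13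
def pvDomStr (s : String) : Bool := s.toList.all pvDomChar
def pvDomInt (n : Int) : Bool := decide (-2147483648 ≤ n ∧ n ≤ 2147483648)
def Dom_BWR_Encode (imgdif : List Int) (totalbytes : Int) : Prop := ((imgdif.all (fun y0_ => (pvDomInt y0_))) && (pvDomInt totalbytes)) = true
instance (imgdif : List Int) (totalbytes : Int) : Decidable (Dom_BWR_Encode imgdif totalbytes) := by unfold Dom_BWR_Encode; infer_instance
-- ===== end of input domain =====

-- B replaces A's fused transpose-and-pack loop (carry byte + bit counter + final flush)
-- by a two-pass decomposition: build the flat bit-plane sequence, then pack chunks of 8.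

-- ===== PORT A =====
-- inner `while currentbyte<=totalbytes-1` loop; state = (tempoutputbyte, tempoutputbit, outputarr).
-- imgdif[currentbyte] is in range under Pre_ (pyGetD's default is never used there);
-- int(math.pow(2,currentbit)) = 2^currentbit exactly (currentbit is 0..8, so .toNat is exact);
-- Python's &, |, <<, >> are PySem.Int.band / PySem.Int.bor / <<< / >>> (tempoutputbit is 0..7 when used, so .toNat is exact).
def bwrInner (imgdif : List Int) (totalbytes currentbit currentbyte tb tbit : Int)
    (out : List Int) : Int × Int × List Int :=
  if h : currentbyte ≤ totalbytes - 1 then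
    let tb' := PySem.Int.bor tb
      ((PySem.Int.band (PySem.List.pyGetD imgdif currentbyte 0) (2 ^ currentbit.toNat)
          >>> currentbit.toNat) <<< tbit.toNat)
    if tbit - 1 < 0 then
      bwrInner imgdif totalbytes currentbit (currentbyte + 1) 0 7 (out ++ [tb'])
    else
      bwrInner imgdif totalbytes currentbit (currentbyte + 1) tb' (tbit - 1) out
  else (tb, tbit, out)
termination_by (totalbytes - currentbyte).toNat
decreasing_by all_goals omega

-- outer `while currentbit>=0` loop (currentbyte is reset to 0 each pass)
def bwrOuter (imgdif : List Int) (totalbytes currentbit tb tbit : Int)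
    (out : List Int) : Int × Int × List Int :=
  if _h : currentbit ≥ 0 then
    let st := bwrInner imgdif totalbytes currentbit 0 tb tbit out
    bwrOuter imgdif totalbytes (currentbit - 1) st.1 st.2.1 st.2.2
  else (tb, tbit, out)
termination_by (currentbit + 1).toNat
decreasing_by omega

def BWR_Encode (imgdif : List Int) (totalbytes : Int) : List Int :=
  let st := bwrOuter imgdif totalbytes 8 0 7 []
  if st.2.1 ≠ 7 then st.2.2 ++ [st.1] else st.2.2

-- ===== PORT B =====
-- sum(b << (7 - j) for j, b in enumerate(chunk)); j is 0..7 inside a chunk, so (7 - j).toNat is exact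
def bwrChunkVal (chunk : List Int) : Int :=
  (PySem.List.enumerate chunk).foldl (fun s jb => s + jb.2 <<< (7 - jb.1).toNat) 0

-- while bits: chunk, bits = bits[:8], bits[8:]; out.append(chunkVal)
def bwrPack (bits : List Int) : List Int :=
  if h : bits = [] then []
  else bwrChunkVal (PySem.List.slice bits none (some 8))
        :: bwrPack (PySem.List.slice bits (some 8) none)
termination_by bits.length
decreasing_by
  have hs := PySem.List.slice_from bits (a := 8) (by norm_num)
  rw [hs]
  cases bits with
  | nil => exact absurd rfl h
  | cons x xs => simp

-- bits = [(imgdif[i] >> bit) & 1 for bit in range(8,-1,-1) for i in range(totalbytes)]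
-- (bit is 8..0, so bit.toNat is exact; imgdif[i] in range under Pre_)
def BWR_Encode_alt (imgdif : List Int) (totalbytes : Int) : List Int :=
  bwrPack ((PySem.List.pyRange 8 (-1) (-1)).flatMap (fun bit =>
    (PySem.List.pyRange 0 totalbytes 1).map (fun i =>
      PySem.Int.band (PySem.List.pyGetD imgdif i 0 >>> bit.toNat) 1)))

-- ===== PRECONDITION & SPEC =====
-- Pre_ excludes exactly the inputs where A raises IndexError (totalbytes exceeds len(imgdif)).
def Pre_BWR_Encode (imgdif : List Int) (totalbytes : Int) : Prop :=
  totalbytes ≤ (imgdif.length : Int)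
instance (imgdif : List Int) (totalbytes : Int) : Decidable (Pre_BWR_Encode imgdif totalbytes) := by
  unfold Pre_BWR_Encode; infer_instance

def pvWitness_BWR_Encode : List Int × Int := ([1, 300], 2)

def Spec_BWR_Encode (imgdif : List Int) (totalbytes : Int) (out : List Int) : Prop := out = BWR_Encode_alt imgdif totalbytes
instance (imgdif : List Int) (totalbytes : Int) (out : List Int) : Decidable (Spec_BWR_Encode imgdif totalbytes out) := by unfold Spec_BWR_Encode; infer_instance

-- ===== CLAIM (what is proved, stated in full; the proofs are below) =====
def Claim_equal_BWR_Encode : Prop := ∀ (imgdif : List Int) (totalbytes : Int), Dom_BWR_Encode imgdif totalbytes → Pre_BWR_Encode imgdif totalbytes → Spec_BWR_Encode imgdif totalbytes (BWR_Encode imgdif totalbytes)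

-- ===== LEMMAS AND PROOFS =====

-- A's packing automaton: one step of the inner-loop body on state (tempbyte, tempbit, out)
def autoStep (st : Int × Int × List Int) (b : Int) : Int × Int × List Int :=
  let tb' := PySem.Int.bor st.1 (b <<< st.2.1.toNat)
  if st.2.1 - 1 < 0 then (0, 7, st.2.2 ++ [tb']) else (tb', st.2.1 - 1, st.2.2)

def bitOf (imgdif : List Int) (b i : Int) : Int :=
  PySem.Int.band (PySem.List.pyGetD imgdif i 0 >>> b.toNat) 1

def plane (imgdif : List Int) (n b : Int) : List Int :=
  (PySem.List.pyRange 0 n 1).map (bitOf imgdif b)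

def bitsFrom (imgdif : List Int) (n : Int) : Nat → List Int
  | 0 => plane imgdif n 0
  | Nat.succ k => plane imgdif n ((k : Int) + 1) ++ bitsFrom imgdif n k

def flushSt (st : Int × Int × List Int) : List Int :=
  if st.2.1 ≠ 7 then st.2.2 ++ [st.1] else st.2.2

def partVal : List Int → Nat → Int
  | [], _ => 0
  | b :: c, j => b * 2 ^ (7 - j) + partVal c (j + 1)

-- (x & 2^b) >> b = (x >> b) & 1, for every Python int x
theorem bv_eq (v : Int) (b : Nat) :
    PySem.Int.band v (2 ^ b) >>> b = PySem.Int.band (v >>> b) 1 := by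
  have hcast2 : ((2:Int) ^ b) = ((2 ^ b : Nat) : Int) := by push_cast; ring
  rw [PySem.Int.band_one, PySem.Int.mod_eq_emod_of_pos (by norm_num),
    Int.shiftRight_eq_div_pow, Int.shiftRight_eq_div_pow]
  by_cases hv : 0 ≤ v
  · obtain ⟨n, rfl⟩ : ∃ n : Nat, v = (n : Int) := ⟨v.toNat, (Int.toNat_of_nonneg hv).symm⟩
    rw [hcast2, PySem.Int.band_natCast, ← Int.natCast_div, Nat.and_two_pow]
    have h1 : (n.testBit b).toNat * 2 ^ b / 2 ^ b = n / 2 ^ b % 2 := by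
      rw [Nat.mul_div_cancel _ (by positivity), Nat.toNat_testBit]
    rw [h1]
    have h2 : ((n:Int)) / ((2^b : Nat) : Int) = ((n / 2^b : Nat) : Int) := (Int.natCast_div n (2^b)).symm
    rw [h2]
    omega
  · obtain ⟨m, rfl⟩ : ∃ m : Nat, v = -(m : Int) - 1 := ⟨(-v-1).toNat, by omega⟩
    have hb2 : (0:Int) < ((2^b : Nat) : Int) := by positivity
    rw [hcast2]
    unfold PySem.Int.band
    rw [if_neg (by omega), if_pos (le_of_lt hb2)]
    have ht : (((2^b : Nat) : Int)).toNat = 2^b := Int.toNat_natCast _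
    have hm : (-(-(m:Int) - 1) - 1).toNat = m := by omega
    rw [ht, hm, Nat.and_comm, Nat.and_two_pow, Nat.toNat_testBit]
    set t := m / 2 ^ b % 2 with htdef
    have ht1 : t ≤ 1 := by omega
    have hq : (-(m:Int) - 1) / ((2^b : Nat) : Int) = -((m / 2^b : Nat) : Int) - 1 := by
      have hmdm := Nat.mod_add_div m (2^b)
      have hlt := Nat.mod_lt m (y := 2^b) (by positivity)
      have hP1 : 1 ≤ 2^b := Nat.one_le_two_pow
      refine ((Int.ediv_emod_unique (a := -(m:Int) - 1) (b := ((2^b:Nat):Int))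
        (q := -((m / 2^b : Nat) : Int) - 1) (r := ((2^b - 1 - m % 2^b : Nat) : Int)) hb2).2
        ⟨?_, by positivity, by omega⟩).1
      have h1 : ((2^b - 1 - m % 2^b : Nat) : Int) = ((2^b:Nat):Int) - 1 - ((m % 2^b : Nat) : Int) := by omega
      have hm2 : ((m:Nat) : Int) = ((m % 2^b : Nat):Int) + ((2^b:Nat):Int) * ((m / 2^b : Nat):Int) := by
        exact_mod_cast hmdm.symm
      rw [h1, hm2]; ring
    rw [hq]
    have h3 : ((2 ^ b - t * 2 ^ b : Nat) : Int) / ((2^b : Nat) : Int) = ((1 - t : Nat) : Int) := by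
      rw [← Int.natCast_div]
      congr 1
      rw [show 2^b - t * 2^b = (1-t) * 2^b by rw [Nat.sub_mul, one_mul]]
      rw [Nat.mul_div_cancel _ (by positivity)]
    rw [h3]
    omega

-- every element of B's bit list is 0 or 1
theorem bitOf_cases (imgdif : List Int) (b i : Int) : bitOf imgdif b i = 0 ∨ bitOf imgdif b i = 1 := by
  unfold bitOf
  rw [PySem.Int.band_one]
  have h1 := PySem.Int.mod_nonneg (a := PySem.List.pyGetD imgdif i 0 >>> b.toNat) (b := 2) (by norm_num)
  have h2 := PySem.Int.mod_lt (a := PySem.List.pyGetD imgdif i 0 >>> b.toNat) (b := 2) (by norm_num)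
  omega

theorem inner_eq (imgdif : List Int) (n cbit cb tb tbit : Int) (out : List Int) :
    bwrInner imgdif n cbit cb tb tbit out =
      List.foldl autoStep (tb, tbit, out)
        ((PySem.List.pyRange cb n 1).map (fun i =>
          PySem.Int.band (PySem.List.pyGetD imgdif i 0) (2 ^ cbit.toNat) >>> cbit.toNat)) := by
  fun_induction bwrInner imgdif n cbit cb tb tbit out with
  | case1 cb tb tbit out h tb' h2 ih =>
    rw [PySem.List.pyRange_one_cons (by omega), List.map_cons, List.foldl_cons, ih]
    congr 1
    simp [autoStep, tb', h2]
  | case2 cb tb tbit out h tb' h2 ih =>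
    rw [PySem.List.pyRange_one_cons (by omega), List.map_cons, List.foldl_cons, ih]
    congr 1
    simp [autoStep, tb', h2]
  | case3 cb tb tbit out h =>
    rw [PySem.List.pyRange_one_eq_nil (by omega)]
    simp

theorem planeA_eq (imgdif : List Int) (n cbit : Int) :
    (PySem.List.pyRange 0 n 1).map (fun i =>
        PySem.Int.band (PySem.List.pyGetD imgdif i 0) (2 ^ cbit.toNat) >>> cbit.toNat) =
      plane imgdif n cbit := by
  unfold plane
  congr 1
  funext i
  exact bv_eq _ _

theorem outer_eq (imgdif : List Int) (n : Int) (k : Nat) (tb tbit : Int) (out : List Int) :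
    bwrOuter imgdif n (k : Int) tb tbit out =
      List.foldl autoStep (tb, tbit, out) (bitsFrom imgdif n k) := by
  induction k generalizing tb tbit out with
  | zero =>
    rw [bwrOuter]
    rw [dif_pos (by positivity), inner_eq, planeA_eq]
    rw [bwrOuter]
    rw [dif_neg (by norm_num)]
    simp [bitsFrom]
  | succ k ih =>
    rw [bwrOuter]
    rw [dif_pos (by positivity), inner_eq, planeA_eq]
    have hc : ((k+1 : Nat) : Int) - 1 = (k : Int) := by push_cast; ring
    rw [hc, ih]
    rw [show (bitsFrom imgdif n (k+1)) = plane imgdif n ((k : Int) + 1) ++ bitsFrom imgdif n k from rfl]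
    rw [List.foldl_append]
    have hc2 : ((k+1 : Nat) : Int) = (k : Int) + 1 := by push_cast; ring
    rw [hc2]

theorem bor_disjoint (tb b : Int) (j : Nat) (hj : j ≤ 7) (hb : b = 0 ∨ b = 1)
    (htb : 0 ≤ tb) (hdvd : (2 ^ (8 - j) : Int) ∣ tb) :
    PySem.Int.bor tb (b <<< (7 - j)) = tb + b * 2 ^ (7 - j) := by
  have hb0 : 0 ≤ b := by rcases hb with rfl | rfl <;> norm_num
  rw [Int.shiftLeft_eq]
  have hv0 : 0 ≤ b * 2 ^ (7 - j) := by positivity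
  unfold PySem.Int.bor
  rw [if_pos htb, if_pos hv0]
  obtain ⟨q, hq⟩ := hdvd
  have hq0 : 0 ≤ q := by
    by_contra hcon
    have hq' : q < 0 := by omega
    nlinarith [pow_pos (show (0:Int) < 2 by norm_num) (8 - j)]
  have hT : tb.toNat = 2 ^ (8 - j) * q.toNat := by
    have h1 : tb = ((2 ^ (8-j) * q.toNat : Nat) : Int) := by
      push_cast
      rw [hq, Int.toNat_of_nonneg hq0]
    omega
  have h87 : (8 : Nat) - j = (7 - j) + 1 := by omega
  have hV : (b * 2 ^ (7 - j)).toNat < 2 ^ (8 - j) := by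
    have hpow : (2:Nat) ^ (8 - j) = 2 ^ (7-j) * 2 := by rw [h87, pow_succ]
    have hp1 : (1:Nat) ≤ 2 ^ (7-j) := Nat.one_le_two_pow
    have hle : (b * 2 ^ (7 - j)).toNat ≤ 2 ^ (7-j) := by
      rcases hb with rfl | rfl
      · simp
      · rw [one_mul, show ((2:Int)^(7-j)) = ((2 ^ (7-j) : Nat) : Int) from by push_cast; ring,
          Int.toNat_natCast]
    omega
  have key : tb.toNat ||| (b * 2 ^ (7 - j)).toNat = tb.toNat + (b * 2^(7-j)).toNat := by
    rw [hT, ← Nat.two_pow_add_eq_or_of_lt hV]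
  rw [key]
  push_cast
  rw [Int.toNat_of_nonneg htb, Int.toNat_of_nonneg hv0]

theorem fold_chunk : ∀ (c : List Int) (j : Nat) (tb : Int) (out : List Int),
    (∀ x ∈ c, x = 0 ∨ x = 1) → j ≤ 7 → j + c.length ≤ 8 → 0 ≤ tb → (2 ^ (8 - j) : Int) ∣ tb →
    List.foldl autoStep (tb, 7 - (j : Int), out) c =
      if j + c.length = 8 then (0, 7, out ++ [tb + partVal c j])
      else (tb + partVal c j, 7 - ((j : Int) + c.length), out) := by
  intro c
  induction c with
  | nil =>
    intro j tb out hmem hj hlen htb hdvd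
    rw [if_neg (by simp; omega)]
    simp [partVal]
  | cons b c ih =>
    intro j tb out hmem hj hlen htb hdvd
    have hb := hmem b (by simp)
    have hb0 : 0 ≤ b * 2 ^ (7 - j) := by
      rcases hb with rfl | rfl <;> positivity
    have hstep : autoStep (tb, 7 - (j:Int), out) b =
        if (7 - (j:Int)) - 1 < 0 then (0, 7, out ++ [tb + b * 2^(7-j)])
        else (tb + b * 2^(7-j), 7 - (j:Int) - 1, out) := by
      unfold autoStep
      have htn : (7 - (j:Int)).toNat = 7 - j := by omega
      simp only [htn, bor_disjoint tb b j hj hb htb hdvd]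
    rw [List.foldl_cons, hstep]
    by_cases hj7 : j = 7
    · subst hj7
      rw [if_pos (by norm_num)]
      have hc : c = [] := List.eq_nil_of_length_eq_zero (by simp at hlen; omega)
      subst hc
      simp [partVal]
    · have hjlt : j < 7 := by omega
      rw [if_neg (by omega)]
      have h71 : 7 - (j:Int) - 1 = 7 - ((j+1 : Nat) : Int) := by push_cast; ring
      have hdvd' : (2 ^ (8 - (j+1)) : Int) ∣ tb + b * 2^(7-j) := by
        have he : (8:Nat) - (j+1) = 7 - j := by omega
        rw [he]
        exact dvd_add (dvd_trans (pow_dvd_pow 2 (by omega)) hdvd) (dvd_mul_left _ _)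
      rw [h71, ih (j+1) (tb + b*2^(7-j)) out (fun x hx => hmem x (by simp [hx]))
        (by omega) (by simp at hlen ⊢; omega) (add_nonneg htb hb0) hdvd']
      have hval : tb + b*2^(7-j) + partVal c (j+1) = tb + partVal (b::c) j := by
        simp [partVal]; ring
      simp only [List.length_cons]
      rw [show j + 1 + c.length = j + (c.length + 1) from by omega,
        show (((j+1) : Nat) : Int) + (c.length : Int) = (j:Int) + (((c.length + 1) : Nat) : Int) from by push_cast; ring,
        hval]

theorem enum_foldl (c : List Int) : ∀ (j : Nat) (s : Int), c.length + j ≤ 8 →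
    (PySem.List.enumerate c (j:Int)).foldl (fun s jb => s + jb.2 <<< (7 - jb.1).toNat) s
      = s + partVal c j := by
  induction c with
  | nil => intro j s hlen; simp [PySem.List.enumerate, partVal]
  | cons b c ih =>
    intro j s hlen
    simp only [PySem.List.enumerate, List.foldl_cons]
    have hj : j ≤ 7 := by simp at hlen; omega
    have htn : (7 - (j:Int)).toNat = 7 - j := by omega
    have hc : (j:Int) + 1 = ((j+1 : Nat) : Int) := by push_cast; ring
    rw [htn, hc, ih (j+1) _ (by simp at hlen ⊢; omega), Int.shiftLeft_eq]
    simp [partVal]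
    ring

theorem chunkVal_eq (c : List Int) (h : c.length ≤ 8) : bwrChunkVal c = partVal c 0 := by
  unfold bwrChunkVal
  have hh := enum_foldl c 0 0 (by omega)
  norm_num at hh
  exact hh

theorem pack_eq (N : Nat) : ∀ (bits : List Int), bits.length ≤ N →
    (∀ x ∈ bits, x = 0 ∨ x = 1) → ∀ out : List Int,
    flushSt (List.foldl autoStep (0, 7, out) bits) = out ++ bwrPack bits := by
  induction N with
  | zero =>
    intro bits hlen hmem out
    have : bits = [] := List.eq_nil_of_length_eq_zero (by omega)
    subst this
    rw [bwrPack]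
    simp [flushSt]
  | succ N ih =>
    intro bits hlen hmem out
    by_cases hnil : bits = []
    · subst hnil
      rw [bwrPack]
      simp [flushSt]
    · have hpos : 0 < bits.length := List.length_pos_of_ne_nil hnil
      have hsl1 : PySem.List.slice bits none (some 8) = bits.take 8 := by
        have := PySem.List.slice_to bits (b := 8) (by norm_num)
        simpa using this
      have hsl2 : PySem.List.slice bits (some 8) none = bits.drop 8 := by
        have := PySem.List.slice_from bits (a := 8) (by norm_num)
        simpa using this
      by_cases h8 : bits.length < 8
      · have hfc := fold_chunk bits 0 0 out hmem (by omega) (by omega) le_rfl ⟨0, by ring⟩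
        norm_num at hfc
        rw [hfc, if_neg (by omega)]
        rw [bwrPack, dif_neg hnil, hsl1, hsl2]
        rw [List.take_of_length_le (by omega), List.drop_eq_nil_of_le (by omega)]
        rw [bwrPack]
        rw [chunkVal_eq bits (by omega)]
        simp [flushSt]
        omega
      · have h8' : 8 ≤ bits.length := by omega
        have hsplit := List.take_append_drop 8 bits
        have hlen8 : (bits.take 8).length = 8 := by simp; omega
        conv_lhs => rw [← hsplit]
        rw [List.foldl_append]
        have hfc := fold_chunk (bits.take 8) 0 0 out
          (fun x hx => hmem x (List.mem_of_mem_take hx)) (by omega) (by omega) le_rfl ⟨0, by ring⟩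
        norm_num [hlen8] at hfc
        rw [hfc]
        rw [ih (bits.drop 8) (by simp; omega) (fun x hx => hmem x (List.mem_of_mem_drop hx)) _]
        have hpb : bwrPack bits = partVal (bits.take 8) 0 :: bwrPack (bits.drop 8) := by
          rw [bwrPack, dif_neg hnil, hsl1, hsl2, chunkVal_eq (bits.take 8) (by omega)]
        rw [hpb]
        simp

theorem bitsFrom_mem (imgdif : List Int) (n : Int) : ∀ (k : Nat), ∀ x ∈ bitsFrom imgdif n k, x = 0 ∨ x = 1 := by
  intro k
  induction k with
  | zero =>
    intro x hx
    simp [bitsFrom, plane] at hx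
    obtain ⟨i, _, rfl⟩ := hx
    exact bitOf_cases _ _ _
  | succ k ih =>
    intro x hx
    simp only [bitsFrom, List.mem_append] at hx
    rcases hx with hx | hx
    · simp [plane] at hx
      obtain ⟨i, _, rfl⟩ := hx
      exact bitOf_cases _ _ _
    · exact ih x hx

theorem bits_eq (imgdif : List Int) (n : Int) :
    (PySem.List.pyRange 8 (-1) (-1)).flatMap (fun bit =>
      (PySem.List.pyRange 0 n 1).map (fun i =>
        PySem.Int.band (PySem.List.pyGetD imgdif i 0 >>> bit.toNat) 1)) =
    bitsFrom imgdif n 8 := by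
  have h9 : PySem.List.pyRange 8 (-1) (-1) = [8,7,6,5,4,3,2,1,0] := by decide
  have hbf : bitsFrom imgdif n 8 = plane imgdif n 8 ++ (plane imgdif n 7 ++ (plane imgdif n 6 ++
      (plane imgdif n 5 ++ (plane imgdif n 4 ++ (plane imgdif n 3 ++ (plane imgdif n 2 ++
      (plane imgdif n 1 ++ plane imgdif n 0))))))) := by
    norm_num [bitsFrom]
  have hp : ∀ bit : Int, List.map (fun i => PySem.Int.band (PySem.List.pyGetD imgdif i 0 >>> ((bit.toNat : Int))) 1)
      (PySem.List.pyRange 0 n 1) = plane imgdif n bit := by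
    intro bit
    have hfn : (fun i => PySem.Int.band (PySem.List.pyGetD imgdif i 0 >>> ((bit.toNat : Int))) 1)
        = bitOf imgdif bit := by
      funext i
      rw [Int.shiftRight_natCast_right]
      rfl
    rw [show plane imgdif n bit = List.map (bitOf imgdif bit) (PySem.List.pyRange 0 n 1) from rfl, hfn]
  rw [h9]
  simp only [List.flatMap_cons, List.flatMap_nil, List.append_nil]
  rw [hp 8, hp 7, hp 6, hp 5, hp 4, hp 3, hp 2, hp 1, hp 0, hbf]

-- ===== VERDICT (by name: the statement is the Claim_ definition above) =====
theorem BWR_Encode_spec : Claim_equal_BWR_Encode := by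
  intro imgdif n hdom hpre
  unfold Spec_BWR_Encode BWR_Encode_alt
  show flushSt (bwrOuter imgdif n 8 0 7 []) = _
  have hout : bwrOuter imgdif n 8 0 7 [] = List.foldl autoStep (0, 7, []) (bitsFrom imgdif n 8) := by
    have h := outer_eq imgdif n 8 0 7 []
    norm_num at h
    exact h
  rw [hout, bits_eq imgdif n]
  have := pack_eq (bitsFrom imgdif n 8).length (bitsFrom imgdif n 8) le_rfl
    (bitsFrom_mem imgdif n 8) []
  simpa using this
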